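-- pv_equiv track=rewrite | github.com/CALeDNA/crux | crux/main_vm/split.py | even_split
-- ===== SOURCE A (Python) =====
-- def even_split(lst, chunks):
--     lst.sort()
--     total_sum = sum(lst)
--     avg_sum = total_sum/float(chunks)
--
--     chunklists = [[] for x in range(chunks)]
--     chunksums = [0] * chunks
--
--     while lst:
--         # pop the last element from sorted array
--         last = lst.pop(-1)
--
--         # append popped element to list with the lowest sum
--         min_index = get_minindex(chunksums)
--         chunklists[min_index].append(last)
--         chunksums[min_index] += last
--     return chunklists
--
-- def get_minindex(inputlist):
--     #get the minimum value in the list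
--     min_value = min(inputlist)
--     #return the index of minimum value
--     min_index=inputlist.index(min_value)
--     return min_index
-- ===== SOURCE B (Python) =====
-- import bisect
--
-- def even_split(lst, chunks):
--     # Note: A sorts/pops lst in place (leaves it empty); B does not mutate lst.
--     chunklists = [[] for _ in range(chunks)]
--     # order: lexicographically sorted list of (chunk sum, chunk index) pairs;
--     # the head is always the chunk with the lowest sum (lowest index on ties).
--     order = [(0, i) for i in range(chunks)]
--     for x in sorted(lst, reverse=True):
--         s, i = order[0]
--         del order[0]
--         chunklists[i].append(x)
--         bisect.insort(order, (s + x, i))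
--     return chunklists
-- ===== Notes on version B (the rewrite author's own statement) =====
-- stated objective: faster
-- what changed: Replaces the per-element min()+.index() double scan over chunksums with a lexicographically sorted list of (sum, index) pairs maintained by bisect.insort, so the lowest-sum chunk is always at the head; also iterates over sorted(lst, reverse=True) instead of in-place sort+pop.
import Mathlib
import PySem

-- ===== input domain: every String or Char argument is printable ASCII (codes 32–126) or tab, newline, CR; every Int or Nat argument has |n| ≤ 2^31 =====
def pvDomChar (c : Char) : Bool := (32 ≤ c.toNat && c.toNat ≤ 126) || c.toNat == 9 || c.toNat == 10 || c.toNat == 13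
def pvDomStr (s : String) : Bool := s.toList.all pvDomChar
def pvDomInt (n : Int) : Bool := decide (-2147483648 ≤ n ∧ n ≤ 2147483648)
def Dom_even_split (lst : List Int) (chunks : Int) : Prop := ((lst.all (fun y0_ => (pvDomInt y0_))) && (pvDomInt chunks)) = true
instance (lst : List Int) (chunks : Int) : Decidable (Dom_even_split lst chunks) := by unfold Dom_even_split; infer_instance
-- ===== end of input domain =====

-- B replaces A's per-element min()+.index() double scan over chunksums with a sorted
-- list of (sum, index) pairs maintained by insertion (bisect.insort), head = lowest-sum
-- chunk; equivalence is about the RETURN value only (A sorts/pops lst in place, B does not).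


-- ===== PORT A =====
-- get_minindex: min(inputlist) then inputlist.index(min_value); min([]) raises
-- ValueError (excluded by Pre_), the 0 fallbacks are unreachable there.
def get_minindex (inputlist : List Int) : Nat :=
  match PySem.List.min? inputlist (fun x => x) with
  | none => 0
  | some m =>
    match PySem.List.index? inputlist m with
    | none => 0
    | some i => i

-- one iteration of A's while-loop: pop last element of the (sorted) list, append it
-- to the chunk with the lowest sum
def evenSplitStep (st : List (List Int) × List Int) (last : Int) :
    List (List Int) × List Int :=
  let mi := get_minindex st.2
  (st.1.modify mi (fun l => l ++ [last]), st.2.modify mi (fun s => s + last))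

-- total_sum/avg_sum are dead float locals; they only matter as the ZeroDivisionError
-- at chunks = 0, which Pre_ excludes.
def even_split (lst : List Int) (chunks : Int) : List (List Int) :=
  let sortedLst := PySem.List.sorted lst (fun x => x) false
  let chunklists := List.replicate chunks.toNat ([] : List Int)
  let chunksums := List.replicate chunks.toNat (0 : Int)
  -- 'while lst: last = lst.pop(-1)' consumes the sorted list from the back
  (sortedLst.reverse.foldl evenSplitStep (chunklists, chunksums)).1

-- ===== PORT B =====
-- bisect.insort on a list of (sum, index) pairs: insert before the first strictly
-- greater pair (exact here: the reachable lists never contain equal pairs, their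
-- indices are distinct, so insort-left/right coincide)
def insortPair (a : Int × Int) : List (Int × Int) → List (Int × Int)
  | [] => [a]
  | b :: t =>
    if a.1 < b.1 ∨ (a.1 = b.1 ∧ a.2 < b.2) then a :: b :: t else b :: insortPair a t

-- one iteration of B's for-loop: take the head (lowest-sum chunk) of the sorted
-- order list, append x to that chunk, re-insert the updated pair.
-- order = [] means order[0] raises IndexError (excluded by Pre_).
def evenSplitAltStep (st : List (List Int) × List (Int × Int)) (x : Int) :
    List (List Int) × List (Int × Int) :=
  match st.2 with
  | [] => st
  | (s, i) :: rest =>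
    (st.1.modify i.toNat (fun l => l ++ [x]), insortPair (s + x, i) rest)

def even_split_alt (lst : List Int) (chunks : Int) : List (List Int) :=
  let chunklists := List.replicate chunks.toNat ([] : List Int)
  let order := (List.range chunks.toNat).map (fun (i : Nat) => ((0 : Int), (i : Int)))
  ((PySem.List.sorted lst (fun x => x) true).foldl evenSplitAltStep
    (chunklists, order)).1

-- ===== PRECONDITION & SPEC =====
-- Pre_ excludes exactly the inputs where A raises: chunks = 0 (ZeroDivisionError in
-- avg_sum) and chunks < 0 with a nonempty lst (min([]) ValueError). A returns on all
-- other inputs, all of which Pre_ admits.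
def Pre_even_split (lst : List Int) (chunks : Int) : Prop :=
  1 ≤ chunks ∨ (lst = [] ∧ chunks ≠ 0)
instance (lst : List Int) (chunks : Int) : Decidable (Pre_even_split lst chunks) := by
  unfold Pre_even_split; infer_instance

def pvWitness_even_split : List Int × Int := ([3, 1, 2], 2)

def Spec_even_split (lst : List Int) (chunks : Int) (out : List (List Int)) : Prop :=
  out = even_split_alt lst chunks
instance (lst : List Int) (chunks : Int) (out : List (List Int)) :
    Decidable (Spec_even_split lst chunks out) := by unfold Spec_even_split; infer_instance

-- ===== CLAIM (what is proved, stated in full; the proofs are below) =====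
def Claim_equal_even_split : Prop := ∀ (lst : List Int) (chunks : Int),
  Dom_even_split lst chunks → Pre_even_split lst chunks →
  Spec_even_split lst chunks (even_split lst chunks)

-- ===== LEMMAS AND PROOFS =====

-- the (sum, index) pairs of a chunksums list, indices starting at k
def pairsOfK : List Int → Int → List (Int × Int)
  | [], _ => []
  | s :: t, k => (s, k) :: pairsOfK t (k + 1)

-- the (non-strict) lexicographic order the 'order' list is kept sorted in
def lexLe (a b : Int × Int) : Prop := a.1 < b.1 ∨ (a.1 = b.1 ∧ a.2 ≤ b.2)

theorem mem_pairsOfK {v j : Int} : ∀ (sums : List Int) (k : Int),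
    (v, j) ∈ pairsOfK sums k ↔ ∃ (p : Nat) (hp : p < sums.length), j = k + p ∧ v = sums[p] := by
  intro sums
  induction sums with
  | nil => intro k; simp [pairsOfK]
  | cons a t ih =>
    intro k
    simp only [pairsOfK, List.mem_cons, ih (k + 1), Prod.mk.injEq]
    constructor
    · rintro (⟨hv, hj⟩ | ⟨p, hp, hj, hv⟩)
      · exact ⟨0, by simp, by omega, by simpa using hv⟩
      · exact ⟨p + 1, by simpa using Nat.succ_lt_succ hp,
          by push_cast at hj ⊢; omega, by simpa using hv⟩
    · rintro ⟨p, hp, hj, hv⟩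
      cases p with
      | zero => exact Or.inl ⟨by simpa using hv, by omega⟩
      | succ q =>
        refine Or.inr ⟨q, by simp at hp; omega,
          by push_cast at hj ⊢; omega, by simpa using hv⟩

theorem pairsOfK_ne_nil {sums : List Int} {k : Int} (h : sums ≠ []) :
    pairsOfK sums k ≠ [] := by
  cases sums with
  | nil => exact absurd rfl h
  | cons a t => simp [pairsOfK]

theorem pairsOfK_set : ∀ (sums : List Int) (p : Nat) (k v : Int) (hp : p < sums.length),
    (pairsOfK (sums.set p v) k).Perm ((v, k + p) :: (pairsOfK sums k).erase (sums[p], k + p)) := by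
  intro sums
  induction sums with
  | nil => intro p k v hp; simp at hp
  | cons a t ih =>
    intro p k v hp
    cases p with
    | zero =>
      simp only [List.set_cons_zero, pairsOfK, List.getElem_cons_zero, Nat.cast_zero,
        add_zero, List.erase_cons_head]
      exact List.Perm.refl _
    | succ q =>
      have hq : q < t.length := by simpa using hp
      simp only [List.set_cons_succ, pairsOfK, List.getElem_cons_succ]
      rw [List.erase_cons_tail (by simp; intro _; omega)]
      have harith : k + 1 + (q : Int) = k + ((q + 1 : Nat) : Int) := by push_cast; ring
      refine List.Perm.trans (List.Perm.cons _ (ih q (k + 1) v hq)) ?_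
      rw [harith]
      exact List.Perm.swap _ _ _

theorem insortPair_perm (a : Int × Int) : ∀ (l : List (Int × Int)),
    (insortPair a l).Perm (a :: l) := by
  intro l
  induction l with
  | nil => simp [insortPair]
  | cons b t ih =>
    rw [insortPair]
    split
    · exact List.Perm.refl _
    · exact List.Perm.trans (List.Perm.cons b ih) (List.Perm.swap a b t)

theorem mem_insortPair {y a : Int × Int} {l : List (Int × Int)}
    (h : y ∈ insortPair a l) : y = a ∨ y ∈ l := by
  have := (insortPair_perm a l).mem_iff.mp h
  simpa using this

theorem insortPair_sorted (a : Int × Int) : ∀ (l : List (Int × Int)),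
    l.Pairwise lexLe → (insortPair a l).Pairwise lexLe := by
  intro l
  induction l with
  | nil => intro _; simp [insortPair]
  | cons b t ih =>
    intro hp
    rcases List.pairwise_cons.mp hp with ⟨hb, ht⟩
    rw [insortPair]
    split
    next hlt =>
      refine List.pairwise_cons.mpr ⟨?_, hp⟩
      intro y hy
      rcases List.mem_cons.mp hy with rfl | hyt
      · unfold lexLe; omega
      · have h2 := hb y hyt
        unfold lexLe at h2 ⊢
        omega
    next hge =>
      refine List.pairwise_cons.mpr ⟨?_, ih ht⟩
      intro y hy
      rcases mem_insortPair hy with rfl | hyt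
      · unfold lexLe
        omega
      · exact hb y hyt

-- head of the sorted order list = (min of chunksums, its first index)
theorem head_min {s i : Int} {t : List (Int × Int)} {sums : List Int}
    (hperm : ((s, i) :: t).Perm (pairsOfK sums 0))
    (hsort : ((s, i) :: t).Pairwise lexLe) :
    PySem.List.min? sums (fun x => x) = some s ∧
    PySem.List.index? sums s = some i.toNat ∧ 0 ≤ i ∧ i.toNat < sums.length := by
  have hmem : (s, i) ∈ pairsOfK sums 0 := hperm.mem_iff.mp (List.mem_cons_self)
  obtain ⟨p, hp, hip, hsp⟩ := (mem_pairsOfK sums 0).mp hmem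
  have hi0 : 0 ≤ i := by omega
  have hitn : i.toNat = p := by omega
  have hle : ∀ y ∈ pairsOfK sums 0, lexLe (s, i) y := by
    intro y hy
    rcases List.mem_cons.mp (hperm.symm.mem_iff.mp hy) with rfl | hyt
    · unfold lexLe; omega
    · exact (List.pairwise_cons.mp hsort).1 y hyt
  have hne : sums ≠ [] := by
    intro h; subst h; simp [pairsOfK] at hmem
  obtain ⟨m, hm⟩ : ∃ m, PySem.List.min? sums (fun x => x) = some m := by
    cases h : PySem.List.min? sums (fun x => x) with
    | none => exact absurd ((PySem.List.min?_eq_none_iff _ _).mp h) hne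
    | some m => exact ⟨m, rfl⟩
  have hmmem := PySem.List.min?_mem hm
  have hmmin := PySem.List.min?_isMin hm
  have hsmem : s ∈ sums := by rw [hsp]; exact List.getElem_mem hp
  have hms : m ≤ s := hmmin s hsmem
  have hsm : s ≤ m := by
    obtain ⟨q, hq, hmq⟩ := List.mem_iff_getElem.mp hmmem
    have hmemq : (m, (q : Int)) ∈ pairsOfK sums 0 :=
      (mem_pairsOfK sums 0).mpr ⟨q, hq, by omega, hmq.symm⟩
    have := hle _ hmemq
    unfold lexLe at this
    omega
  have hms' : m = s := le_antisymm hms hsm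
  subst hms'
  have hsome : (PySem.List.index? sums m).isSome :=
    (PySem.List.index?_isSome_iff sums m).mpr hsmem
  obtain ⟨kk, hkk⟩ := Option.isSome_iff_exists.mp hsome
  obtain ⟨hk, hgk, hmink⟩ := PySem.List.getElem_of_index?_eq_some hkk
  have h1 : kk ≤ p := by
    by_contra h
    exact hmink p (by omega) hsp.symm
  have h2 : p ≤ kk := by
    have hmem2 : (m, (kk : Int)) ∈ pairsOfK sums 0 :=
      (mem_pairsOfK sums 0).mpr ⟨kk, hk, by omega, hgk.symm⟩
    have := hle _ hmem2
    unfold lexLe at this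
    omega
  have hkp : kk = p := le_antisymm h1 h2
  refine ⟨hm, ?_, hi0, by omega⟩
  rw [hkk, hitn, hkp]

theorem loop_eq : ∀ (items : List Int) (cl : List (List Int)) (sums : List Int)
    (ord : List (Int × Int)), sums ≠ [] → ord.Pairwise lexLe → ord.Perm (pairsOfK sums 0) →
    (items.foldl evenSplitStep (cl, sums)).1 = (items.foldl evenSplitAltStep (cl, ord)).1 := by
  intro items
  induction items with
  | nil => intro cl sums ord _ _ _; rfl
  | cons x items ih =>
    intro cl sums ord hne hsort hperm
    cases ord with
    | nil =>
      have := List.Perm.nil_eq hperm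
      exact absurd this.symm (pairsOfK_ne_nil hne)
    | cons hd tl =>
      obtain ⟨s, i⟩ := hd
      obtain ⟨hmin, hidx, hi0, hlt⟩ := head_min hperm hsort
      obtain ⟨hk, hget, -⟩ := PySem.List.getElem_of_index?_eq_some hidx
      simp only [List.foldl_cons]
      have hstepA : evenSplitStep (cl, sums) x =
          (cl.modify i.toNat (fun l => l ++ [x]), sums.modify i.toNat (fun v => v + x)) := by
        simp only [evenSplitStep, get_minindex, hmin, hidx]
      have hstepB : evenSplitAltStep (cl, (s, i) :: tl) x =
          (cl.modify i.toNat (fun l => l ++ [x]), insortPair (s + x, i) tl) := rfl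
      rw [hstepA, hstepB]
      have hmod : sums.modify i.toNat (fun v => v + x) = sums.set i.toNat (s + x) := by
        rw [List.modify_eq_set]
        congr 1
        rw [List.getElem?_eq_getElem hlt]
        simp [hget]
      rw [hmod]
      apply ih
      · intro h
        apply hne
        have := congrArg List.length h
        simp at this
        exact this
      · exact insortPair_sorted _ _ hsort.of_cons
      · refine ((insortPair_perm _ _).trans ?_)
        refine List.Perm.trans ?_ (pairsOfK_set sums i.toNat 0 (s + x) hlt).symm
        have h0p : (0 : Int) + (i.toNat : Int) = i := by omega
        rw [hget, h0p]
        refine List.Perm.cons _ ?_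
        have herase := hperm.erase (s, i)
        rw [List.erase_cons_head] at herase
        exact herase

theorem init_order_eq : ∀ (n : Nat) (k : Int),
    pairsOfK (List.replicate n 0) k =
      (List.range n).map (fun (i : Nat) => ((0 : Int), k + (i : Int))) := by
  intro n
  induction n with
  | zero => intro k; simp [pairsOfK]
  | succ m ih =>
    intro k
    rw [List.replicate_succ]
    simp only [pairsOfK]
    rw [List.range_succ_eq_map, ih (k + 1)]
    simp only [List.map_cons, List.map_map, Nat.cast_zero, add_zero]
    congr 1
    apply List.map_congr_left
    intro x _
    simp only [Function.comp_apply]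
    push_cast
    ring_nf

theorem init_order_eq0 (n : Nat) :
    pairsOfK (List.replicate n 0) 0 =
      (List.range n).map (fun (i : Nat) => ((0 : Int), (i : Int))) := by
  rw [init_order_eq]
  apply List.map_congr_left
  intro x _
  norm_num

theorem init_order_sorted (n : Nat) (k : Int) :
    (pairsOfK (List.replicate n 0) k).Pairwise lexLe := by
  rw [init_order_eq, List.pairwise_map]
  refine List.Pairwise.imp ?_ List.pairwise_lt_range
  intro a b hab
  unfold lexLe
  dsimp only
  omega

theorem sorted_rev_eq (lst : List Int) :
    PySem.List.sorted lst (fun x => x) true = (PySem.List.sorted lst (fun x => x) false).reverse := by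
  have h := PySem.List.eq_of_perm_of_pairwise_le_of_injective (fun x : Int => x)
    (fun a b hab => hab)
    (l₁ := (PySem.List.sorted lst (fun x => x) true).reverse)
    (l₂ := PySem.List.sorted lst (fun x => x) false)
    (((List.reverse_perm _).trans (PySem.List.sorted_perm _ _ _)).trans
      (PySem.List.sorted_perm lst (fun x => x) false).symm)
    (by
      rw [List.pairwise_reverse]
      exact PySem.List.sorted_pairwise_rev lst (fun x => x))
    (PySem.List.sorted_pairwise lst (fun x => x))
  calc PySem.List.sorted lst (fun x => x) true
      = ((PySem.List.sorted lst (fun x => x) true).reverse).reverse := (List.reverse_reverse _).symm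
    _ = (PySem.List.sorted lst (fun x => x) false).reverse := by rw [h]

-- ===== VERDICT (by name: the statement is the Claim_ definition above) =====
theorem even_split_spec : Claim_equal_even_split := by
  unfold Claim_equal_even_split
  intro lst chunks _ hpre
  unfold Spec_even_split even_split even_split_alt
  rw [sorted_rev_eq]
  rcases hpre with h1 | ⟨rfl, h2⟩
  · apply loop_eq
    · intro h
      have := congrArg List.length h
      simp at this
      omega
    · rw [← init_order_eq0 chunks.toNat]
      exact init_order_sorted chunks.toNat 0
    · rw [init_order_eq0]
  · have hnil : PySem.List.sorted ([] : List Int) (fun x => x) false = [] := by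
      rw [PySem.List.sorted_eq_nil_iff]
    rw [hnil]
    rfl
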